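-- pv_equiv track=rewrite | github.com/PutriNoratira/CP125-Class-Repo-ty | labs/lab06/exercise1/exercise1.py | get_legit_power_users
-- ===== SOURCE A (Python) =====
-- def get_legit_power_users(log_data, bot_ids, threshold):
--     user_actions = {}
--
--     for timestamps, user_id, action_type in log_data:
--         if user_id in bot_ids:
--             continue
--         if user_id not in user_actions:
--             user_actions[user_id] = set()
--         user_actions[user_id].add(action_type)
--
--     power_users = []
--     for user_id, actions in user_actions.items():
--         if len(actions) > threshold:
--             power_users.append(user_id)
--
--     return sorted(power_users)
-- ===== SOURCE B (Python) =====
-- def get_legit_power_users(log_data, bot_ids, threshold):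
--     users = sorted({u for _, u, _ in log_data if u not in bot_ids})
--     return [u for u in users
--             if len({a for _, uu, a in log_data if uu == u}) > threshold]
-- ===== Notes on version B (the rewrite author's own statement) =====
-- stated objective: alternative
-- what changed: Replaces A's dict-of-sets aggregation plus final sort by computing the sorted distinct non-bot user list first and then, per user, rescanning the log for that user's distinct action types.
import Mathlib
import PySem

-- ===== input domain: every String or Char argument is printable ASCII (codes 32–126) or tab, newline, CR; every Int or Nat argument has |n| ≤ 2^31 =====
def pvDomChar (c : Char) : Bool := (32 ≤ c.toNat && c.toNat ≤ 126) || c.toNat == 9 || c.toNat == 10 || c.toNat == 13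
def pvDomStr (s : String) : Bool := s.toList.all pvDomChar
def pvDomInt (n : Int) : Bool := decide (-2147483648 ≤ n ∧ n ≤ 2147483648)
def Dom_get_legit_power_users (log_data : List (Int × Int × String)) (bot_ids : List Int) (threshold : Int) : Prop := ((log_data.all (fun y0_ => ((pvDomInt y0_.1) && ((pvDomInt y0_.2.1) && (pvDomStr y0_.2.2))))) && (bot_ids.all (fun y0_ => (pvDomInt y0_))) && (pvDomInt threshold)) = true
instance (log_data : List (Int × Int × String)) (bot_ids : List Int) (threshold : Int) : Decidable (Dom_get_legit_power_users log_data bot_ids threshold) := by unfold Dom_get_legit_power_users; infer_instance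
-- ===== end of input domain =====

-- B replaces A's dict-of-sets aggregation by "sorted distinct users, then a per-user scan of the log";
-- objective: alternative decomposition (no aggregation structure), not faster.

-- ===== PORT A =====
-- one iteration of A's first loop: skip bots, ensure the key exists, add the action to the user's set
def pvAStep (bot_ids : List Int) (d : PySem.Dict Int (PySem.Set String)) (r : Int × Int × String) :
    PySem.Dict Int (PySem.Set String) :=
  if bot_ids.contains r.2.1 then d
  else
    (if d.contains r.2.1 then d else d.insert r.2.1 PySem.Set.empty).modify r.2.1 PySem.Set.empty
      (fun s => PySem.Set.add s r.2.2)

def get_legit_power_users (log_data : List (Int × Int × String)) (bot_ids : List Int) (threshold : Int) : List Int :=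
  let user_actions := log_data.foldl (pvAStep bot_ids) PySem.Dict.empty
  let power_users := user_actions.items.foldl
    (fun acc p => if (p.2.length : Int) > threshold then acc ++ [p.1] else acc) []
  PySem.List.sorted power_users (fun x => x) false

-- ===== PORT B =====
def get_legit_power_users_alt (log_data : List (Int × Int × String)) (bot_ids : List Int) (threshold : Int) : List Int :=
  let users := PySem.List.sorted
    (PySem.Set.ofList ((log_data.filter (fun r => !bot_ids.contains r.2.1)).map (fun r => r.2.1)))
    (fun x => x) false
  users.filter (fun u =>
    decide (((PySem.Set.ofList ((log_data.filter (fun r => r.2.1 == u)).map (fun r => r.2.2))).length : Int) > threshold))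

-- ===== PRECONDITION & SPEC =====
def Spec_get_legit_power_users (log_data : List (Int × Int × String)) (bot_ids : List Int) (threshold : Int) (out : List Int) : Prop := out = get_legit_power_users_alt log_data bot_ids threshold
instance (log_data : List (Int × Int × String)) (bot_ids : List Int) (threshold : Int) (out : List Int) : Decidable (Spec_get_legit_power_users log_data bot_ids threshold out) := by unfold Spec_get_legit_power_users; infer_instance

-- ===== CLAIM (what is proved, stated in full; the proofs are below) =====
def Claim_equal_get_legit_power_users : Prop := ∀ (log_data : List (Int × Int × String)) (bot_ids : List Int) (threshold : Int), Dom_get_legit_power_users log_data bot_ids threshold → Spec_get_legit_power_users log_data bot_ids threshold (get_legit_power_users log_data bot_ids threshold)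

-- ===== LEMMAS AND PROOFS =====

-- the body of A's loop once the bot test has fired: ensure key, add action
def pvNbStep (d : PySem.Dict Int (PySem.Set String)) (r : Int × Int × String) :
    PySem.Dict Int (PySem.Set String) :=
  (if d.contains r.2.1 then d else d.insert r.2.1 PySem.Set.empty).modify r.2.1 PySem.Set.empty
    (fun s => PySem.Set.add s r.2.2)

lemma pvAStep_fold (log_data : List (Int × Int × String)) (bot_ids : List Int)
    (d : PySem.Dict Int (PySem.Set String)) :
    log_data.foldl (pvAStep bot_ids) d
      = (log_data.filter (fun r => !bot_ids.contains r.2.1)).foldl pvNbStep d := by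
  induction log_data generalizing d with
  | nil => rfl
  | cons r t ih =>
    by_cases hb : r.2.1 ∈ bot_ids
    · simp [List.foldl, List.filter, hb, pvAStep, ih]
    · simp [List.foldl, List.filter, hb, pvAStep, pvNbStep, ih]

lemma pvNbStep_getD (d : PySem.Dict Int (PySem.Set String)) (r : Int × Int × String) (u : Int) :
    (pvNbStep d r).getD u ([] : PySem.Set String)
      = if r.2.1 = u then PySem.Set.add (d.getD u ([] : PySem.Set String)) r.2.2
        else d.getD u ([] : PySem.Set String) := by
  unfold pvNbStep
  by_cases h : r.2.1 = u
  · subst h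
    by_cases hc : d.contains r.2.1
    · simp [hc, PySem.Dict.getD_modify_self]
    · simp only [Bool.not_eq_true] at hc
      have h0 : d.getD r.2.1 ([] : PySem.Set String) = [] :=
        PySem.Dict.getD_of_not_contains d _ hc
      simp [hc, PySem.Dict.getD_modify_self, PySem.Dict.getD_insert_self, h0,
        PySem.Set.empty, PySem.Set.add]
  · have h' : u ≠ r.2.1 := fun hh => h hh.symm
    by_cases hc : d.contains r.2.1
    · simp [hc, h, PySem.Set.empty, PySem.Dict.getD_modify_of_ne _ _ _ h']
    · simp [hc, h, PySem.Set.empty, PySem.Dict.getD_modify_of_ne _ _ _ h',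
        PySem.Dict.getD_insert_of_ne _ _ _ h']

lemma pvNbStep_keys (d : PySem.Dict Int (PySem.Set String)) (r : Int × Int × String) :
    (pvNbStep d r).keys = PySem.Set.add d.keys r.2.1 := by
  unfold pvNbStep
  by_cases hc : d.contains r.2.1
  · have hk : r.2.1 ∈ d.keys := (PySem.Dict.contains_iff_mem_keys d r.2.1).mp hc
    simp [hc, PySem.Dict.keys_modify, PySem.Dict.keys_insert_of_contains _ _ hc,
      PySem.Set.add, hk]
  · simp only [Bool.not_eq_true] at hc
    have hk : r.2.1 ∉ d.keys := fun hm => by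
      simp [(PySem.Dict.contains_iff_mem_keys d r.2.1).mpr hm] at hc
    simp [hc, PySem.Dict.keys_modify,
      PySem.Dict.keys_insert_of_contains _ _ (PySem.Dict.contains_insert_self d r.2.1 _),
      PySem.Dict.keys_insert_of_not_contains _ _ hc, PySem.Set.add, hk]

lemma pvFold_keys (l : List (Int × Int × String)) (d : PySem.Dict Int (PySem.Set String)) :
    (l.foldl pvNbStep d).keys = PySem.Set.update d.keys (l.map (fun r => r.2.1)) := by
  induction l generalizing d with
  | nil => rfl
  | cons r t ih => simp [List.foldl, ih, pvNbStep_keys, PySem.Set.update]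

lemma pvFold_getD (l : List (Int × Int × String)) (d : PySem.Dict Int (PySem.Set String)) (u : Int) :
    (l.foldl pvNbStep d).getD u ([] : PySem.Set String)
      = PySem.Set.update (d.getD u ([] : PySem.Set String))
          ((l.filter (fun r => r.2.1 == u)).map (fun r => r.2.2)) := by
  induction l generalizing d with
  | nil => rfl
  | cons r t ih =>
    by_cases h : r.2.1 = u
    · simp [List.foldl, List.filter, h, ih, pvNbStep_getD, PySem.Set.update]
    · have h' : (r.2.1 == u) = false := by simpa using h
      simp [List.foldl, List.filter, h, h', ih, pvNbStep_getD, PySem.Set.update]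

-- a nodup list whose pairwise order is ≤ under an injective-on-it reading is strictly increasing
lemma pvNodup_pairwise_lt {l : List Int} (hnd : l.Nodup)
    (hle : l.Pairwise (fun a b => a ≤ b)) : l.Pairwise (fun a b => a < b) :=
  (hle.and hnd).imp (fun h => lt_of_le_of_ne h.1 h.2)

-- sorting then filtering = filtering then sorting, for a nodup Int list
lemma pvSorted_filter (ks : List Int) (p : Int → Bool) (hnd : ks.Nodup) :
    PySem.List.sorted (ks.filter p) (fun x => x) false
      = (PySem.List.sorted ks (fun x => x) false).filter p := by
  apply PySem.List.sorted_eq_of_perm_of_pairwise_lt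
  · exact List.Perm.filter p (PySem.List.sorted_perm ks (fun x => x) false)
  · exact List.Pairwise.filter p
      (pvNodup_pairwise_lt
        ((PySem.List.sorted_perm ks (fun x => x) false).nodup_iff.mpr hnd)
        (PySem.List.sorted_pairwise ks (fun x => x)))

lemma pvNodup_fold_keys (l : List (Int × Int × String)) :
    (l.foldl pvNbStep PySem.Dict.empty).keys.Nodup := by
  rw [pvFold_keys]
  exact PySem.Set.nodup_update _ _ List.nodup_nil

-- on non-bot users, filtering the whole log by user equals filtering the bot-free log by user
lemma pvFilter_user (log_data : List (Int × Int × String)) (bot_ids : List Int) (u : Int)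
    (hu : u ∉ bot_ids) :
    (log_data.filter (fun r => !bot_ids.contains r.2.1)).filter (fun r => r.2.1 == u)
      = log_data.filter (fun r => r.2.1 == u) := by
  rw [List.filter_filter]
  apply List.filter_congr
  intro r _
  by_cases h : r.2.1 = u
  · simp [h, hu]
  · simp [h]

theorem pv_main (log_data : List (Int × Int × String)) (bot_ids : List Int) (threshold : Int) :
    get_legit_power_users log_data bot_ids threshold
      = get_legit_power_users_alt log_data bot_ids threshold := by
  unfold get_legit_power_users get_legit_power_users_alt
  dsimp only
  rw [pvAStep_fold]
  set nb := log_data.filter (fun r => !bot_ids.contains r.2.1) with hnb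
  set d := nb.foldl pvNbStep PySem.Dict.empty with hd
  have hnd : d.keys.Nodup := pvNodup_fold_keys nb
  have hkeys : d.keys = PySem.Set.ofList (nb.map (fun r => r.2.1)) := by
    rw [hd, pvFold_keys]; rfl
  -- A's second loop: collect the qualifying keys in item order
  rw [PySem.List.foldl_append_ite (p := fun p : Int × PySem.Set String => (p.2.length : Int) > threshold)
        (f := fun p => p.1)]
  rw [PySem.Dict.items_eq_map_keys d hnd ([] : PySem.Set String), List.filter_map, List.map_map]
  simp only [List.nil_append, Function.comp_def, List.map_id']
  -- the predicate on a key k, rewritten through the dict's contents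
  have hpred : ∀ k ∈ d.keys,
      (decide ((((PySem.Dict.getD d k ([] : PySem.Set String)).length : Int) > threshold)) : Bool)
        = decide (((PySem.Set.ofList ((log_data.filter (fun r => r.2.1 == k)).map (fun r => r.2.2))).length : Int) > threshold) := by
    intro k hk
    have hku : k ∉ bot_ids := by
      rw [hkeys] at hk
      rw [PySem.Set.mem_ofList] at hk
      obtain ⟨r, hr, hrk⟩ := List.mem_map.mp hk
      have := List.of_mem_filter hr
      simp only [Bool.not_eq_eq_eq_not, Bool.not_true] at this
      intro hmem
      rw [← hrk] at hmem
      simp [hmem] at this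
    rw [hd, pvFold_getD]
    have : (nb.filter (fun r => r.2.1 == k)).map (fun r => r.2.2)
        = (log_data.filter (fun r => r.2.1 == k)).map (fun r => r.2.2) := by
      rw [hnb, pvFilter_user log_data bot_ids k hku]
    rw [this]
    rfl
  rw [List.filter_congr hpred]
  rw [hkeys]
  exact pvSorted_filter _ _ (PySem.Set.nodup_ofList _)

-- ===== VERDICT (by name: the statement is the Claim_ definition above) =====
theorem get_legit_power_users_spec : Claim_equal_get_legit_power_users := by
  intro log_data bot_ids threshold _
  unfold Spec_get_legit_power_users
  exact pv_main log_data bot_ids threshold
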